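-- pv_equiv track=rewrite | github.com/Ax31R0d/Loteria | Lotery_Pruebas1_0.py | jerarquia_histo
-- ===== SOURCE A (Python) =====
-- from typing import List, Dict, Tuple, Optional
--
-- def jerarquia_histo(lista: List[int], start: int = 30) -> List[int]:
--     n = len(lista)
--     # Convertimos start a índice 0-based
--     i0 = start - 1
--     # Diccionario con la última ocurrencia (0-based) de cada dígito
--     last_occ = {d: -1 for d in range(10)}
--     resultado: List[int] = []
--
--     for i, val in enumerate(lista):
--         last_occ[val] = i
--         # Solo a partir de i0 y sin procesar el último elemento
--         if i >= i0 and i < n - 1: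
--             # Construir orden de caída:
--             # 1) Dígitos presentes, ordenados por última aparición descendente
--             presentes = [d for d in range(10) if last_occ[d] != -1]
--             presentes.sort(key=lambda d: -last_occ[d])
--             # 2) Dígitos ausentes, ordenados ascendentemente
--             ausentes = [d for d in range(10) if last_occ[d] == -1]
--             ausentes.sort()
--             orden_caida = presentes + ausentes
--             # Buscar la posición 1-based del siguiente valor
--             siguiente = lista[i + 1]
--             posicion = orden_caida.index(siguiente) + 1
--             resultado.append(posicion)
--
--     return resultado
-- ===== SOURCE B (Python) =====
-- def jerarquia_histo(lista, start=30):
--     n = len(lista)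
--     i0 = start - 1
--     # move-to-front ranking: seen digits in recency order, unseen keep ascending order
--     order = list(range(10))
--     resultado = []
--     for i, val in enumerate(lista):
--         if 0 <= val <= 9:
--             order = [val] + [d for d in order if d != val]
--         if i0 <= i < n - 1:
--             resultado.append(order.index(lista[i + 1]) + 1)
--     return resultado
-- ===== Notes on version B (the rewrite author's own statement) =====
-- stated objective: simpler
-- what changed: Replaces the per-step rebuild of the fall order (dict of last occurrences + filter + sort over the 10 digits) by a single move-to-front list maintained incrementally.
import Mathlib
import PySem

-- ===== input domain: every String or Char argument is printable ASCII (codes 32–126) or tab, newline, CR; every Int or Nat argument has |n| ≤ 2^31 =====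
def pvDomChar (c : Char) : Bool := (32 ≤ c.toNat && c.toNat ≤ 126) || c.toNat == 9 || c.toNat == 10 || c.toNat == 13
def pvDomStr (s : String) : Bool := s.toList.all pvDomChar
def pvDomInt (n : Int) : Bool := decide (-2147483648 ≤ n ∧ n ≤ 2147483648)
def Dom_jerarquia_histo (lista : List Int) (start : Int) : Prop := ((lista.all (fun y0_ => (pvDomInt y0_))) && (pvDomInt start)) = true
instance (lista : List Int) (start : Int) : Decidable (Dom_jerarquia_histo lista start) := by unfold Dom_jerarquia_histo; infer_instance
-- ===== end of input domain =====

-- B replaces A's per-step rebuild (last-occurrence dict + filter + sort of the 10 digits) by one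
-- move-to-front list maintained incrementally; equal output on every input where A returns.

-- ===== PORT A =====
-- loop body of A, one step of the fold over enumerate(lista); lista/n/i0 are the enclosing locals
def jhStepA (lista : List Int) (n i0 : Int)
    (s : PySem.Dict Int Int × List Int) (iv : Int × Int) : PySem.Dict Int Int × List Int :=
  let i := iv.1
  let val := iv.2
  let lo := s.1.insert val i                  -- last_occ[val] = i
  if i0 ≤ i ∧ i < n - 1 then
    let presentes := (PySem.List.pyRange 0 10 1).filter (fun d => lo.getD d (-1) ≠ -1)
    let presentes := PySem.List.sorted presentes (fun d => -(lo.getD d (-1))) false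
    let ausentes := (PySem.List.pyRange 0 10 1).filter (fun d => lo.getD d (-1) = -1)
    let ausentes := PySem.List.sorted ausentes (fun d => d) false
    let orden_caida := presentes ++ ausentes
    let siguiente := (PySem.List.pyGet? lista (i + 1)).getD 0   -- i+1 is always in range here
    -- orden_caida.index(siguiente): getD (-1) is a totalization guard, ValueError excluded by Pre_
    let posicion := ((PySem.List.index? orden_caida siguiente).map (fun k => (k : Int))).getD (-1) + 1
    (lo, s.2 ++ [posicion])
  else (lo, s.2)

def jerarquia_histo (lista : List Int) (start : Int) : List Int :=
  let n : Int := lista.length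
  let i0 : Int := start - 1
  let lo0 : PySem.Dict Int Int :=
    (PySem.List.pyRange 0 10 1).foldl (fun d k => d.insert k (-1)) PySem.Dict.empty
  ((PySem.List.enumerate lista 0).foldl (jhStepA lista n i0) (lo0, [])).2

-- ===== PORT B =====
-- loop body of B: move-to-front on `order`, then rank the next value
def jhStepB (lista : List Int) (n i0 : Int)
    (s : List Int × List Int) (iv : Int × Int) : List Int × List Int :=
  let i := iv.1
  let val := iv.2
  let order := if 0 ≤ val ∧ val ≤ 9 then val :: s.1.filter (fun d => d ≠ val) else s.1
  if i0 ≤ i ∧ i < n - 1 then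
    let siguiente := (PySem.List.pyGet? lista (i + 1)).getD 0
    let posicion := ((PySem.List.index? order siguiente).map (fun k => (k : Int))).getD (-1) + 1
    (order, s.2 ++ [posicion])
  else (order, s.2)

def jerarquia_histo_alt (lista : List Int) (start : Int) : List Int :=
  let n : Int := lista.length
  let i0 : Int := start - 1
  ((PySem.List.enumerate lista 0).foldl (jhStepB lista n i0) (PySem.List.pyRange 0 10 1, [])).2

-- ===== PRECONDITION & SPEC =====
-- Pre_ excludes exactly the inputs where A raises ValueError: some ranked "next value"
-- (element at an index j with 1 ≤ j, start ≤ j, j < len) is outside the digits 0..9.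
def Pre_jerarquia_histo (lista : List Int) (start : Int) : Prop :=
  ∀ p ∈ PySem.List.enumerate lista 0, (1 ≤ p.1 ∧ start ≤ p.1) → (0 ≤ p.2 ∧ p.2 ≤ 9)
instance (lista : List Int) (start : Int) : Decidable (Pre_jerarquia_histo lista start) := by
  unfold Pre_jerarquia_histo; infer_instance

def pvWitness_jerarquia_histo : List Int × Int := ([0, 1, 2, 3], 1)

def Spec_jerarquia_histo (lista : List Int) (start : Int) (out : List Int) : Prop := out = jerarquia_histo_alt lista start
instance (lista : List Int) (start : Int) (out : List Int) : Decidable (Spec_jerarquia_histo lista start out) := by unfold Spec_jerarquia_histo; infer_instance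

-- ===== CLAIM (what is proved, stated in full; the proofs are below) =====
def Claim_equal_jerarquia_histo : Prop := ∀ (lista : List Int) (start : Int), Dom_jerarquia_histo lista start → Pre_jerarquia_histo lista start → Spec_jerarquia_histo lista start (jerarquia_histo lista start)

-- ===== LEMMAS AND PROOFS =====

-- the invariant tying A's last-occurrence dict to B's move-to-front list after k processed elements
def jhInv (lo : PySem.Dict Int Int) (ord : List Int) (k : Int) : Prop :=
  ∃ S : List Int,
    ord = S ++ (PySem.List.pyRange 0 10 1).filter (fun d => lo.getD d (-1) = -1) ∧
    S.Nodup ∧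
    (∀ d : Int, d ∈ S ↔ ((0 ≤ d ∧ d < 10) ∧ lo.getD d (-1) ≠ -1)) ∧
    S.Pairwise (fun a b => lo.getD b (-1) < lo.getD a (-1)) ∧
    (∀ d ∈ S, 0 ≤ lo.getD d (-1) ∧ lo.getD d (-1) < k)

lemma jhInv_ordenCaida (lo : PySem.Dict Int Int) (ord : List Int) (k : Int)
    (h : jhInv lo ord k) :
    PySem.List.sorted ((PySem.List.pyRange 0 10 1).filter (fun d => lo.getD d (-1) ≠ -1))
        (fun d => -(lo.getD d (-1))) false
      ++ PySem.List.sorted ((PySem.List.pyRange 0 10 1).filter (fun d => lo.getD d (-1) = -1))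
        (fun d => d) false
      = ord := by
  obtain ⟨S, hord, hnd, hmem, hpw, _⟩ := h
  have hperm : S.Perm ((PySem.List.pyRange 0 10 1).filter (fun d => lo.getD d (-1) ≠ -1)) := by
    rw [List.perm_ext_iff_of_nodup hnd
      (List.Nodup.filter _ (PySem.List.nodup_pyRange_one 0 10))]
    intro a
    simp only [List.mem_filter, PySem.List.mem_pyRange_one, decide_eq_true_eq, hmem a]
  have h1 : PySem.List.sorted ((PySem.List.pyRange 0 10 1).filter (fun d => lo.getD d (-1) ≠ -1))
      (fun d => -(lo.getD d (-1))) false = S := by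
    refine PySem.List.sorted_eq_of_perm_of_pairwise_lt _ _ _ hperm ?_
    exact hpw.imp (fun h => by omega)
  have h2 : PySem.List.sorted ((PySem.List.pyRange 0 10 1).filter (fun d => lo.getD d (-1) = -1))
      (fun d => d) false
      = (PySem.List.pyRange 0 10 1).filter (fun d => lo.getD d (-1) = -1) := by
    refine PySem.List.sorted_eq_of_perm_of_pairwise_lt _ _ _ (List.Perm.refl _) ?_
    exact (PySem.List.pairwise_lt_pyRange_one 0 10).filter _
  rw [h1, h2, hord]

lemma jhInv_step (lo : PySem.Dict Int Int) (ord : List Int) (k : Int) (val : Int)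
    (hk : 0 ≤ k) (h : jhInv lo ord k) :
    jhInv (lo.insert val k)
      (if 0 ≤ val ∧ val ≤ 9 then val :: ord.filter (fun d => d ≠ val) else ord) (k + 1) := by
  obtain ⟨S, hord, hnd, hmem, hpw, hbd⟩ := h
  by_cases hv : 0 ≤ val ∧ val ≤ 9
  · rw [if_pos hv]
    refine ⟨val :: S.filter (fun d => d ≠ val), ?_, ?_, ?_, ?_, ?_⟩
    · have hU : (PySem.List.pyRange 0 10 1).filter
          (fun d => (lo.insert val k).getD d (-1) = -1)
          = ((PySem.List.pyRange 0 10 1).filter (fun d => lo.getD d (-1) = -1)).filter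
              (fun d => d ≠ val) := by
        rw [List.filter_filter]
        refine List.filter_congr ?_
        intro d _
        by_cases hdv : d = val
        · subst hdv
          simp [PySem.Dict.getD_insert_self]
          omega
        · simp [PySem.Dict.getD_insert_of_ne _ _ _ hdv, hdv]
      rw [hU, hord, List.filter_append, List.cons_append]
    · refine List.Nodup.cons ?_ (hnd.filter _)
      simp
    · intro d
      by_cases hdv : d = val
      · subst hdv
        simp only [List.mem_cons, true_or, true_iff, PySem.Dict.getD_insert_self]
        constructor
        · omega
        · omega
      · simp only [List.mem_cons, List.mem_filter, hmem d,
          PySem.Dict.getD_insert_of_ne _ _ _ hdv, decide_eq_true_eq]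
        tauto
    · refine List.pairwise_cons.mpr ⟨?_, ?_⟩
      · intro b hb
        have hb' := List.mem_of_mem_filter hb
        have hbv : b ≠ val := by simpa using (List.of_mem_filter hb)
        rw [PySem.Dict.getD_insert_of_ne _ _ _ hbv, PySem.Dict.getD_insert_self]
        exact (hbd b hb').2
      · have h1 : (S.filter (fun d => d ≠ val)).Pairwise
            (fun a b => lo.getD b (-1) < lo.getD a (-1)) := hpw.filter _
        refine List.Pairwise.imp_of_mem ?_ h1
        intro a b ha hb hab
        have hA : a ≠ val := by simpa using (List.of_mem_filter ha)
        have hB : b ≠ val := by simpa using (List.of_mem_filter hb)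
        rw [PySem.Dict.getD_insert_of_ne _ _ _ hA, PySem.Dict.getD_insert_of_ne _ _ _ hB]
        exact hab
    · intro d hd
      rcases List.mem_cons.mp hd with rfl | hd'
      · rw [PySem.Dict.getD_insert_self]; omega
      · have hdv : d ≠ val := by simpa using (List.of_mem_filter hd')
        have := hbd d (List.mem_of_mem_filter hd')
        rw [PySem.Dict.getD_insert_of_ne _ _ _ hdv]
        omega
  · rw [if_neg hv]
    have hne : ∀ d : Int, 0 ≤ d ∧ d < 10 → d ≠ val := by intro d hd; omega
    refine ⟨S, ?_, hnd, ?_, ?_, ?_⟩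
    · rw [hord]
      congr 1
      refine List.filter_congr ?_
      intro d hd
      have hd' : 0 ≤ d ∧ d < 10 := by
        simpa [PySem.List.mem_pyRange_one] using hd
      simp [PySem.Dict.getD_insert_of_ne _ _ _ (hne d hd')]
    · intro d
      rw [hmem d]
      constructor
      · rintro ⟨hd, hlo⟩
        exact ⟨hd, by rw [PySem.Dict.getD_insert_of_ne _ _ _ (hne d hd)]; exact hlo⟩
      · rintro ⟨hd, hlo⟩
        exact ⟨hd, by rwa [PySem.Dict.getD_insert_of_ne _ _ _ (hne d hd)] at hlo⟩
    · refine List.Pairwise.imp_of_mem ?_ hpw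
      intro a b ha hb hab
      have ha' := ((hmem a).mp ha).1
      have hb' := ((hmem b).mp hb).1
      rw [PySem.Dict.getD_insert_of_ne _ _ _ (hne a ha'),
        PySem.Dict.getD_insert_of_ne _ _ _ (hne b hb')]
      exact hab
    · intro d hd
      have hd' := ((hmem d).mp hd).1
      rw [PySem.Dict.getD_insert_of_ne _ _ _ (hne d hd')]
      have := hbd d hd
      omega

lemma jh_fold (lista : List Int) (n i0 : Int) :
    ∀ (l : List Int) (k : Int) (lo : PySem.Dict Int Int) (ord acc : List Int),
      0 ≤ k → jhInv lo ord k →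
      ((PySem.List.enumerate l k).foldl (jhStepA lista n i0) (lo, acc)).2
        = ((PySem.List.enumerate l k).foldl (jhStepB lista n i0) (ord, acc)).2 := by
  intro l
  induction l with
  | nil => intro k lo ord acc _ _; simp [PySem.List.enumerate_nil]
  | cons x xs ih =>
    intro k lo ord acc hk hinv
    rw [PySem.List.enumerate_cons, List.foldl_cons, List.foldl_cons]
    have hinv' := jhInv_step lo ord k x hk hinv
    have horden := jhInv_ordenCaida _ _ _ hinv'
    unfold jhStepA jhStepB
    simp only []
    by_cases hc : i0 ≤ k ∧ k < n - 1
    · rw [if_pos hc, if_pos hc, horden]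
      exact ih (k + 1) _ _ _ (by omega) hinv'
    · rw [if_neg hc, if_neg hc]
      exact ih (k + 1) _ _ _ (by omega) hinv'

lemma jhInv_init :
    jhInv ((PySem.List.pyRange 0 10 1).foldl (fun d k => d.insert k (-1)) PySem.Dict.empty)
      (PySem.List.pyRange 0 10 1) 0 := by
  have h0 : ∀ d : Int,
      ((PySem.List.pyRange 0 10 1).foldl (fun d k => d.insert k (-1)) PySem.Dict.empty).getD d (-1)
        = -1 := by
    intro d
    have : ∀ (l : List Int) (dd : PySem.Dict Int Int), dd.getD d (-1) = -1 →
        (l.foldl (fun d k => d.insert k (-1)) dd).getD d (-1) = -1 := by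
      intro l
      induction l with
      | nil => intro dd h; simpa using h
      | cons y ys ih =>
        intro dd h
        refine ih _ ?_
        by_cases hy : d = y
        · subst hy; rw [PySem.Dict.getD_insert_self]
        · rw [PySem.Dict.getD_insert_of_ne _ _ _ hy]; exact h
    exact this _ _ (by simp [PySem.Dict.getD_empty])
  refine ⟨[], ?_, List.nodup_nil, ?_, List.Pairwise.nil, by simp⟩
  · rw [List.nil_append]
    symm
    refine List.filter_eq_self.mpr ?_
    intro a _
    simp [h0 a]
  · intro d; simp [h0 d]

-- ===== VERDICT (by name: the statement is the Claim_ definition above) =====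
theorem jerarquia_histo_spec : Claim_equal_jerarquia_histo := by
  intro lista start _ _
  unfold Spec_jerarquia_histo jerarquia_histo jerarquia_histo_alt
  exact jh_fold lista lista.length (start - 1) lista 0 _ _ [] le_rfl jhInv_init
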